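-- pv_equiv track=rewrite | github.com/schwieni/si_units | siunits/main.py | _power_text
-- ===== SOURCE A (Python) =====
-- def _power_text(power: int) -> str:
--     chars = {
--         "-": "⁻",
--         "0": "⁰",
--         "1": "¹",
--         "2": "²",
--         "3": "³",
--         "4": "⁴",
--         "5": "⁵",
--         "6": "⁶",
--         "7": "⁷",
--         "8": "⁸",
--         "9": "⁹",
--     }
--
--     result = "".join(chars[char] for char in str(power))
--     # Ommit first power
--     new_result = ""  # Don't modify result in place
--     for i, char in enumerate(result):
--         if char == "¹":
--             if i == 0 or result[i-1] != "⁻":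
--                 continue
--         new_result += char
--
--     return new_result
-- ===== SOURCE B (Python) =====
-- _SUP = str.maketrans("-0123456789", "⁻⁰¹²³⁴⁵⁶⁷⁸⁹")
--
--
-- def _power_text(power: int) -> str:
--     text = str(power).translate(_SUP)
--     # Protect the one possible leading "⁻¹", strip every other "¹", restore.
--     return text.replace("⁻¹", "S").replace("¹", "").replace("S", "⁻¹")
-- ===== Notes on version B (the rewrite author's own statement) =====
-- stated objective: idiomatic
-- what changed: B replaces A's hand-built dict plus index-aware enumerate loop (which consults result[i-1] to decide whether a '¹' survives) by str.translate for the digit mapping and a three-step replace chain that protects the one possible leading '⁻¹' with a sentinel, strips every other '¹', and restores it.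
import Mathlib
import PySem

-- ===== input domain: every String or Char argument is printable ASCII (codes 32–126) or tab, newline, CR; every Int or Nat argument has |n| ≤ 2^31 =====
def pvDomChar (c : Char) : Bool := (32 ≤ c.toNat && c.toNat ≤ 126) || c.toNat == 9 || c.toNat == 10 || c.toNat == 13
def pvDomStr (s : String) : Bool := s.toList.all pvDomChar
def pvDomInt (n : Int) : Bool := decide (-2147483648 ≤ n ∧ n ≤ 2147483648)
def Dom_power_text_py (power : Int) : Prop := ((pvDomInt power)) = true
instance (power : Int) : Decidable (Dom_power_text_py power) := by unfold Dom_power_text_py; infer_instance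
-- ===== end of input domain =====

-- B replaces A's index-aware filtering loop by a replace chain (protect the leading "⁻¹",
-- strip every other "¹", restore) and the dict comprehension by str.translate; objective: idiomatic.

-- ===== PORT A =====
-- the loop body of A's `for i, char in enumerate(result)` (acc = new_result)
def pvAStep (result : List Char) (acc : List Char) (ic : Int × Char) : List Char :=
  if ic.2 = '¹' then
    if ic.1 = 0 ∨ PySem.List.pyGet? result (ic.1 - 1) ≠ some '⁻' then acc
    else acc ++ [ic.2]
  else acc ++ [ic.2]

def power_text_py (power : Int) : String :=
  let chars : PySem.Dict Char Char :=
    (((((((((((PySem.Dict.empty.insert '-' '⁻').insert '0' '⁰').insert '1' '¹').insert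
      '2' '²').insert '3' '³').insert '4' '⁴').insert '5' '⁵').insert '6' '⁶').insert
      '7' '⁷').insert '8' '⁸').insert '9' '⁹')
  -- "".join(chars[char] for char in str(power)); chars[char] never raises KeyError
  -- (str(int) contains only '-' and digits), so the `.getD c` default is unreachable
  let result : List Char := (PySem.Int.toStr power).toList.map (fun c => (chars.get? c).getD c)
  let newResult : List Char := (PySem.List.enumerate result 0).foldl (pvAStep result) []
  String.ofList newResult

-- ===== PORT B =====
-- str.maketrans("-0123456789", "⁻⁰¹²³⁴⁵⁶⁷⁸⁹") + .translate = per-char mapping, unmapped chars kept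
def pvSupChar (c : Char) : Char :=
  if c = '-' then '⁻'
  else if c = '0' then '⁰' else if c = '1' then '¹' else if c = '2' then '²'
  else if c = '3' then '³' else if c = '4' then '⁴' else if c = '5' then '⁵'
  else if c = '6' then '⁶' else if c = '7' then '⁷' else if c = '8' then '⁸'
  else if c = '9' then '⁹' else c

def power_text_py_alt (power : Int) : String :=
  let text : String := String.ofList ((PySem.Int.toStr power).toList.map pvSupChar)
  PySem.Str.replace (PySem.Str.replace (PySem.Str.replace text "⁻¹" "S") "¹" "") "S" "⁻¹"

-- ===== PRECONDITION & SPEC =====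
def Spec_power_text_py (power : Int) (out : String) : Prop := out = power_text_py_alt power
instance (power : Int) (out : String) : Decidable (Spec_power_text_py power out) := by unfold Spec_power_text_py; infer_instance

-- ===== CLAIM (what is proved, stated in full; the proofs are below) =====
def Claim_equal_power_text_py : Prop := ∀ (power : Int), Dom_power_text_py power → Spec_power_text_py power (power_text_py power)

-- ===== LEMMAS AND PROOFS =====

-- the ASCII chars str(int) can contain (besides '-') and their superscripts
def pvDigits : List Char := ['0','1','2','3','4','5','6','7','8','9']
def pvSups : List Char := ['⁰','¹','²','³','⁴','⁵','⁶','⁷','⁸','⁹']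

theorem pvToDigitsCore_mem : ∀ (fuel n : Nat) (acc : List Char),
    (∀ c ∈ acc, c ∈ pvDigits) → ∀ c ∈ Nat.toDigitsCore 10 fuel n acc, c ∈ pvDigits := by
  intro fuel
  induction fuel with
  | zero => intro n acc hacc c hc; rw [Nat.toDigitsCore.eq_def] at hc; exact hacc c hc
  | succ fuel ih =>
    intro n acc hacc c hc
    rw [Nat.toDigitsCore.eq_def] at hc
    simp only at hc
    have hd : (n % 10).digitChar ∈ pvDigits := by
      have h10 : n % 10 < 10 := Nat.mod_lt _ (by norm_num)
      generalize hm : n % 10 = m at h10 ⊢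
      interval_cases m <;> decide
    have hacc' : ∀ c' ∈ ((n % 10).digitChar :: acc), c' ∈ pvDigits := by
      intro c' hc'
      rw [List.mem_cons] at hc'
      rcases hc' with h | h
      · rw [h]; exact hd
      · exact hacc c' h
    split at hc
    · exact hacc' c hc
    · exact ih _ _ hacc' c hc

theorem pvToDigitsCore_ne_nil : ∀ (fuel n : Nat) (acc : List Char),
    fuel ≠ 0 ∨ acc ≠ [] → Nat.toDigitsCore 10 fuel n acc ≠ [] := by
  intro fuel
  induction fuel with
  | zero =>
    intro n acc h
    rw [Nat.toDigitsCore.eq_def]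
    rcases h with h | h
    · exact absurd rfl h
    · simpa using h
  | succ fuel ih =>
    intro n acc _
    rw [Nat.toDigitsCore.eq_def]
    simp only
    split
    · simp
    · exact ih _ _ (Or.inr (by simp))

theorem pvToDigits_mem (n : Nat) : ∀ c ∈ Nat.toDigits 10 n, c ∈ pvDigits := by
  intro c hc
  exact pvToDigitsCore_mem _ _ _ (by intro c' h; cases h) c hc

theorem pvToDigits_ne_nil (n : Nat) : Nat.toDigits 10 n ≠ [] :=
  pvToDigitsCore_ne_nil _ _ _ (Or.inl (by simp))

-- A's dict lookup agrees with B's translate table on every char str(int) can contain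
theorem pvLookup_eq_sup : ∀ c ∈ ('-' :: pvDigits),
    ((((((((((((PySem.Dict.empty.insert '-' '⁻').insert '0' '⁰').insert '1' '¹').insert
      '2' '²').insert '3' '³').insert '4' '⁴').insert '5' '⁵').insert '6' '⁶').insert
      '7' '⁷').insert '8' '⁸').insert '9' '⁹').get? c).getD c = pvSupChar c := by
  intro c hc
  fin_cases hc <;> decide

theorem pvSup_of_digit : ∀ c ∈ pvDigits, pvSupChar c ∈ pvSups := by
  intro c hc; fin_cases hc <;> decide

-- replace.go leaves the list alone when the first char of `old` does not occur
theorem pvGo_not_mem (h : Char) (t nw : List Char) : ∀ (l : List Char) (fuel : Nat) (acc : List Char),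
    h ∉ l → l.length ≤ fuel → PySem.Chars.replace.go (h :: t) nw fuel l acc = acc.reverse ++ l := by
  intro l
  induction l with
  | nil =>
    intro fuel acc _ _
    rw [PySem.Chars.replace.go.eq_def]
    cases fuel <;> simp
  | cons c l ih =>
    intro fuel acc hmem hlen
    cases fuel with
    | zero => simp at hlen
    | succ fuel =>
      rw [PySem.Chars.replace.go.eq_def]
      simp only
      have hpre : (h :: t).isPrefixOf (c :: l) = false := by
        simp only [List.isPrefixOf_cons₂]
        have : (h == c) = false := by
          simp only [beq_eq_false_iff_ne]; intro he; exact hmem (he ▸ List.mem_cons_self)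
        simp [this]
      rw [hpre]
      simp only [Bool.false_eq_true, if_false]
      rw [ih fuel (c :: acc) (fun hm => hmem (List.mem_cons_of_mem _ hm)) (by simpa using Nat.le_of_succ_le_succ hlen)]
      simp

-- replace.go for old = "¹", new = "" is filter (· ≠ '¹')
theorem pvGo_filter : ∀ (l : List Char) (fuel : Nat) (acc : List Char),
    l.length ≤ fuel → PySem.Chars.replace.go ['¹'] [] fuel l acc = acc.reverse ++ l.filter (· ≠ '¹') := by
  intro l
  induction l with
  | nil =>
    intro fuel acc _
    rw [PySem.Chars.replace.go.eq_def]
    cases fuel <;> simp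
  | cons c l ih =>
    intro fuel acc hlen
    cases fuel with
    | zero => simp at hlen
    | succ fuel =>
      rw [PySem.Chars.replace.go.eq_def]
      simp only
      by_cases hc : c = '¹'
      · have hpre : (['¹']).isPrefixOf (c :: l) = true := by
          subst hc; simp [List.isPrefixOf]
        rw [hpre]
        simp only [if_true, List.length_cons, List.length_nil, Nat.zero_add,
          List.drop_succ_cons, List.drop_zero, List.reverse_nil, List.nil_append]
        rw [ih fuel _ (by simpa using Nat.le_of_succ_le_succ hlen)]
        subst hc
        simp
      · have hpre : (['¹']).isPrefixOf (c :: l) = false := by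
          simp only [List.isPrefixOf_cons₂]
          simp [List.isPrefixOf, beq_eq_false_iff_ne, Ne.symm, hc]
        rw [hpre]
        simp only [Bool.false_eq_true, if_false]
        rw [ih fuel _ (by simpa using Nat.le_of_succ_le_succ hlen)]
        simp [hc]

-- A's loop over the tail region: every previous char is ≠ '⁻', so it is a plain filter
theorem pvFoldTail : ∀ (d u s acc : List Char), s = u ++ d → u ≠ [] →
    (∀ c, u.getLast? = some c → c ≠ '⁻') → '⁻' ∉ d →
    (PySem.List.enumerate d (u.length : Int)).foldl (pvAStep s) acc
      = acc ++ d.filter (· ≠ '¹') := by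
  intro d
  induction d with
  | nil => intro u s acc _ _ _ _; simp [PySem.List.enumerate_nil]
  | cons c d ih =>
    intro u s acc hs hu hlast hmem
    rw [PySem.List.enumerate_cons]
    simp only [List.foldl_cons]
    have hstep : pvAStep s acc ((u.length : Int), c) =
        if c = '¹' then acc else acc ++ [c] := by
      unfold pvAStep
      have hne0 : ((u.length : Int) = 0) = False := by
        simp only [eq_iff_iff, iff_false]
        intro h
        exact hu (List.eq_nil_of_length_eq_zero (by exact_mod_cast h))
      have hprev : PySem.List.pyGet? s ((u.length : Int) - 1) = u.getLast? := by
        have h1 : 1 ≤ u.length := Nat.one_le_iff_ne_zero.mpr (fun h => hu (List.eq_nil_of_length_eq_zero h))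
        have : ((u.length : Int) - 1) = ((u.length - 1 : Nat) : Int) := by omega
        rw [this, PySem.List.pyGet?_natCast, hs]
        rw [List.getElem?_append_left (by omega)]
        rw [List.getLast?_eq_getElem?]
      rcases Option.eq_none_or_eq_some u.getLast? with h | ⟨a, h⟩
      · exact absurd (List.getLast?_eq_none_iff.mp h) hu
      · have ha : a ≠ '⁻' := hlast a h
        simp [hprev, h, ha]
    rw [hstep]
    have hrec : ∀ acc', (PySem.List.enumerate d ((u.length : Int) + 1)).foldl (pvAStep s) acc'
        = acc' ++ d.filter (· ≠ '¹') := by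
      intro acc'
      have hlen : ((u.length : Int) + 1) = ((u ++ [c]).length : Int) := by simp
      rw [hlen]
      exact ih (u ++ [c]) s acc' (by simp [hs]) (by simp)
        (by intro c' hc'; simp [List.getLast?_append] at hc'; rw [← hc'];
            intro h; exact hmem (h ▸ List.mem_cons_self))
        (fun h => hmem (List.mem_cons_of_mem _ h))
    by_cases hc : c = '¹' <;> simp [hc, hrec]


theorem pvSups_ne : ∀ c ∈ pvSups, c ≠ '⁻' ∧ c ≠ 'S' := by
  intro c hc
  fin_cases hc <;> exact ⟨by decide, by decide⟩

theorem pvStr_ext {a b : String} (h : a.toList = b.toList) : a = b :=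
  String.toList_inj.mp h

-- one unfolding step of replace.go on a nonempty list
theorem pvGo_succ (old nw : List Char) (fuel : Nat) (c : Char) (l acc : List Char) :
    PySem.Chars.replace.go old nw (fuel+1) (c::l) acc =
      if old.isPrefixOf (c::l) = true then
        PySem.Chars.replace.go old nw fuel (List.drop old.length (c::l)) (nw.reverse ++ acc)
      else PySem.Chars.replace.go old nw fuel l (c::acc) := by
  rw [PySem.Chars.replace.go.eq_def]

theorem pvReplace_eq_go (s old nw : List Char) (h : old ≠ []) :
    PySem.Chars.replace s old nw = PySem.Chars.replace.go old nw s.length s [] := by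
  unfold PySem.Chars.replace
  rw [if_neg (by simpa [List.isEmpty_iff] using h)]

-- B's replace chain when the text contains neither '⁻' nor 'S': plain removal of '¹'
theorem pvChain_pos (s : List Char) (hm : '⁻' ∉ s) (hS : 'S' ∉ s) :
    PySem.Chars.replace (PySem.Chars.replace (PySem.Chars.replace s ['⁻','¹'] ['S']) ['¹'] []) ['S'] ['⁻','¹']
      = s.filter (· ≠ '¹') := by
  have h1 : PySem.Chars.replace s ['⁻','¹'] ['S'] = s := by
    rw [pvReplace_eq_go _ _ _ (by simp), pvGo_not_mem '⁻' ['¹'] ['S'] s s.length [] hm le_rfl]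
    simp
  have h2 : PySem.Chars.replace s ['¹'] [] = s.filter (· ≠ '¹') := by
    rw [pvReplace_eq_go _ _ _ (by simp), pvGo_filter s s.length [] le_rfl]
    simp
  have hSf : 'S' ∉ s.filter (· ≠ '¹') := fun h => hS (List.mem_of_mem_filter h)
  rw [h1, h2, pvReplace_eq_go _ _ _ (by simp),
    pvGo_not_mem 'S' [] ['⁻','¹'] _ _ [] hSf le_rfl]
  simp

-- B's replace chain on '⁻' :: c0 :: rest (no further '⁻' or 'S'): keeps c0, filters the rest
theorem pvChain_neg (c0 : Char) (rest : List Char) (hc0m : c0 ≠ '⁻') (hc0S : c0 ≠ 'S')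
    (hm : '⁻' ∉ rest) (hS : 'S' ∉ rest) :
    PySem.Chars.replace (PySem.Chars.replace (PySem.Chars.replace ('⁻'::c0::rest) ['⁻','¹'] ['S']) ['¹'] []) ['S'] ['⁻','¹']
      = '⁻' :: c0 :: rest.filter (· ≠ '¹') := by
  by_cases hc : c0 = '¹'
  · subst hc
    have h1 : PySem.Chars.replace ('⁻'::'¹'::rest) ['⁻','¹'] ['S'] = 'S' :: rest := by
      rw [pvReplace_eq_go _ _ _ (by simp)]
      simp only [List.length_cons]
      rw [pvGo_succ]
      rw [if_pos (by simp [List.isPrefixOf])]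
      simp only [List.length_cons, List.length_nil, List.drop_succ_cons, List.drop_zero,
        List.reverse_cons, List.reverse_nil, List.nil_append, List.append_nil]
      rw [pvGo_not_mem '⁻' ['¹'] ['S'] rest _ _ hm (by omega)]
      simp
    have h2 : PySem.Chars.replace ('S' :: rest) ['¹'] [] = 'S' :: rest.filter (· ≠ '¹') := by
      rw [pvReplace_eq_go _ _ _ (by simp), pvGo_filter _ _ [] le_rfl]
      simp
    have hSf : 'S' ∉ rest.filter (· ≠ '¹') := fun h => hS (List.mem_of_mem_filter h)
    rw [h1, h2, pvReplace_eq_go _ _ _ (by simp)]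
    simp only [List.length_cons]
    rw [pvGo_succ, if_pos (by simp [List.isPrefixOf])]
    simp only [List.length_cons, List.length_nil, List.drop_succ_cons, List.drop_zero,
      List.reverse_cons, List.reverse_nil, List.nil_append, List.append_nil]
    rw [pvGo_not_mem 'S' [] ['⁻','¹'] _ _ _ hSf (by simp)]
    simp
  · have hnm : '⁻' ∉ c0 :: rest := by
      intro h; rcases List.mem_cons.mp h with h | h
      · exact hc0m h.symm
      · exact hm h
    have h1 : PySem.Chars.replace ('⁻'::c0::rest) ['⁻','¹'] ['S'] = '⁻'::c0::rest := by
      rw [pvReplace_eq_go _ _ _ (by simp)]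
      simp only [List.length_cons]
      rw [pvGo_succ]
      rw [if_neg (by simp [List.isPrefixOf, Ne.symm hc])]
      rw [pvGo_not_mem '⁻' ['¹'] ['S'] (c0::rest) _ _ hnm (by simp)]
      simp
    have h2 : PySem.Chars.replace ('⁻'::c0::rest) ['¹'] [] = '⁻' :: c0 :: rest.filter (· ≠ '¹') := by
      rw [pvReplace_eq_go _ _ _ (by simp), pvGo_filter _ _ [] le_rfl]
      simp [hc, (by decide : ('⁻' : Char) ≠ '¹')]
    have hSf : 'S' ∉ '⁻' :: c0 :: rest.filter (· ≠ '¹') := by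
      intro h
      rcases List.mem_cons.mp h with h | h
      · exact absurd h.symm (by decide)
      rcases List.mem_cons.mp h with h | h
      · exact hc0S h.symm
      · exact hS (List.mem_of_mem_filter h)
    rw [h1, h2, pvReplace_eq_go _ _ _ (by simp),
      pvGo_not_mem 'S' [] ['⁻','¹'] _ _ [] hSf le_rfl]
    simp

-- A's loop on '⁻' :: c0 :: rest
theorem pvA_neg (c0 : Char) (rest : List Char) (hc0 : c0 ≠ '⁻') (hm : '⁻' ∉ rest) :
    (PySem.List.enumerate ('⁻'::c0::rest) 0).foldl (pvAStep ('⁻'::c0::rest)) []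
      = '⁻' :: c0 :: rest.filter (· ≠ '¹') := by
  rw [PySem.List.enumerate_cons, PySem.List.enumerate_cons]
  simp only [List.foldl_cons]
  have h1 : pvAStep ('⁻'::c0::rest) [] (0, '⁻') = ['⁻'] := by
    unfold pvAStep
    rw [if_neg (by decide)]
    rfl
  have h2 : pvAStep ('⁻'::c0::rest) ['⁻'] (0 + 1, c0) = ['⁻', c0] := by
    unfold pvAStep
    by_cases hc : c0 = '¹'
    · simp [hc]
    · simp [hc]
  rw [h1, h2]
  rw [show ((0:Int) + 1 + 1) = ((['⁻', c0].length : Nat) : Int) by simp]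
  rw [pvFoldTail rest ['⁻', c0] ('⁻'::c0::rest) ['⁻', c0] rfl (by simp)
    (by intro c hc; simp at hc; rw [← hc]; exact hc0) hm]
  simp

-- A's loop on c0 :: rest with no '⁻' anywhere
theorem pvA_pos (c0 : Char) (rest : List Char) (hc0 : c0 ≠ '⁻') (hm : '⁻' ∉ rest) :
    (PySem.List.enumerate (c0::rest) 0).foldl (pvAStep (c0::rest)) []
      = (c0::rest).filter (· ≠ '¹') := by
  rw [PySem.List.enumerate_cons]
  simp only [List.foldl_cons]
  have h1 : pvAStep (c0::rest) [] (0, c0) = if c0 = '¹' then [] else [c0] := by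
    unfold pvAStep
    by_cases hc : c0 = '¹' <;> simp [hc]
  rw [h1]
  rw [show ((0:Int) + 1) = (([c0].length : Nat) : Int) by simp]
  rw [pvFoldTail rest [c0] (c0::rest) _ rfl (by simp)
    (by intro c hc; simp at hc; rw [← hc]; exact hc0) hm]
  by_cases hc : c0 = '¹'
  · subst hc; simp
  · simp [hc]

-- the characters str(power) consists of
theorem pvToChars_neg (power : Int) (h : power < 0) :
    PySem.Int.toChars power = '-' :: Nat.toDigits 10 power.natAbs := by
  simp [PySem.Int.toChars, h]

theorem pvToChars_nonneg (power : Int) (h : ¬ power < 0) :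
    PySem.Int.toChars power = Nat.toDigits 10 power.toNat := by
  simp [PySem.Int.toChars, h]

theorem pvMain (power : Int) : power_text_py power = power_text_py_alt power := by
  simp only [power_text_py, power_text_py_alt, PySem.Int.toList_toStr]
  apply pvStr_ext
  have e1 : ("⁻¹" : String).toList = ['⁻','¹'] := by decide
  have e2 : ("¹" : String).toList = ['¹'] := by decide
  have e3 : ("S" : String).toList = ['S'] := by decide
  have e0 : ("" : String).toList = [] := by decide
  simp only [PySem.Str.toList_replace, e1, e2, e3, e0, String.toList_ofList]
  by_cases hneg : power < 0
  · rw [pvToChars_neg power hneg]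
    obtain ⟨c0, rest, hD⟩ : ∃ c0 rest, (Nat.toDigits 10 power.natAbs).map pvSupChar = c0 :: rest := by
      rcases hD : (Nat.toDigits 10 power.natAbs).map pvSupChar with _ | ⟨c0, rest⟩
      · exact absurd (List.map_eq_nil_iff.mp hD) (pvToDigits_ne_nil _)
      · exact ⟨c0, rest, rfl⟩
    have hmem : ∀ c ∈ c0 :: rest, c ∈ pvSups := by
      rw [← hD]
      intro c hc
      rcases List.mem_map.mp hc with ⟨a, ha, rfl⟩
      exact pvSup_of_digit a (pvToDigits_mem _ a ha)
    have hlookup : ('-' :: Nat.toDigits 10 power.natAbs).map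
        (fun c => (((((((((((((PySem.Dict.empty.insert '-' '⁻').insert '0' '⁰').insert '1' '¹').insert
          '2' '²').insert '3' '³').insert '4' '⁴').insert '5' '⁵').insert '6' '⁶').insert
          '7' '⁷').insert '8' '⁸').insert '9' '⁹')).get? c).getD c)
        = ('-' :: Nat.toDigits 10 power.natAbs).map pvSupChar := by
      apply List.map_congr_left
      intro c hc
      apply pvLookup_eq_sup
      rcases List.mem_cons.mp hc with h | h
      · simp [h]
      · exact List.mem_cons_of_mem _ (pvToDigits_mem _ c h)
    rw [hlookup]
    simp only [List.map_cons, hD, (by decide : pvSupChar '-' = '⁻')]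
    have hc0 := pvSups_ne c0 (hmem c0 List.mem_cons_self)
    have hrest : ∀ c ∈ rest, c ≠ '⁻' ∧ c ≠ 'S' := fun c hc =>
      pvSups_ne c (hmem c (List.mem_cons_of_mem _ hc))
    rw [pvA_neg c0 rest hc0.1 (fun h => (hrest _ h).1 rfl),
      pvChain_neg c0 rest hc0.1 hc0.2 (fun h => (hrest _ h).1 rfl) (fun h => (hrest _ h).2 rfl)]
  · rw [pvToChars_nonneg power hneg]
    obtain ⟨c0, rest, hD⟩ : ∃ c0 rest, (Nat.toDigits 10 power.toNat).map pvSupChar = c0 :: rest := by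
      rcases hD : (Nat.toDigits 10 power.toNat).map pvSupChar with _ | ⟨c0, rest⟩
      · exact absurd (List.map_eq_nil_iff.mp hD) (pvToDigits_ne_nil _)
      · exact ⟨c0, rest, rfl⟩
    have hmem : ∀ c ∈ c0 :: rest, c ∈ pvSups := by
      rw [← hD]
      intro c hc
      rcases List.mem_map.mp hc with ⟨a, ha, rfl⟩
      exact pvSup_of_digit a (pvToDigits_mem _ a ha)
    have hlookup : (Nat.toDigits 10 power.toNat).map
        (fun c => (((((((((((((PySem.Dict.empty.insert '-' '⁻').insert '0' '⁰').insert '1' '¹').insert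
          '2' '²').insert '3' '³').insert '4' '⁴').insert '5' '⁵').insert '6' '⁶').insert
          '7' '⁷').insert '8' '⁸').insert '9' '⁹')).get? c).getD c)
        = (Nat.toDigits 10 power.toNat).map pvSupChar := by
      apply List.map_congr_left
      intro c hc
      exact pvLookup_eq_sup c (List.mem_cons_of_mem _ (pvToDigits_mem _ c hc))
    rw [hlookup, hD]
    have hc0 := pvSups_ne c0 (hmem c0 List.mem_cons_self)
    have hrest : ∀ c ∈ rest, c ≠ '⁻' ∧ c ≠ 'S' := fun c hc =>
      pvSups_ne c (hmem c (List.mem_cons_of_mem _ hc))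
    rw [pvA_pos c0 rest hc0.1 (fun h => (hrest _ h).1 rfl),
      pvChain_pos (c0 :: rest)
        (by intro h; rcases List.mem_cons.mp h with h | h
            · exact hc0.1 h.symm
            · exact (hrest _ h).1 rfl)
        (by intro h; rcases List.mem_cons.mp h with h | h
            · exact hc0.2 h.symm
            · exact (hrest _ h).2 rfl)]

-- ===== VERDICT (by name: the statement is the Claim_ definition above) =====
theorem power_text_py_spec : Claim_equal_power_text_py := by
  intro power _
  unfold Spec_power_text_py
  exact pvMain power
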